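-- pv_equiv track=rewrite | github.com/cacticouncil/herptest | herptest/toolbox.py | get_cutout
-- ===== SOURCE A (Python) =====
-- def __get_screen_dimensions(text):
--     return (len(text), len(text[0]) if len(text) > 0 else 0)
--
-- def __pos_in_range(pos_x, pos_y, start_x, start_y, width, height):
--     if pos_x >= start_x and pos_x < start_x + width:
--         if pos_y >= start_y and pos_y < start_y + height:
--             return True
--     return False
--
-- def __adjust_dimensions(text, x, y, width, height):
--     screen_height, screen_width = __get_screen_dimensions(text)
--
--     # Make sure the x/y positions are within the range of the screen
--     if x < 0:
--         width += x
--         x = 0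
--     elif x >= screen_width:
--         x = screen_width - 1
--         width = 0
--     if y < 0:
--         height += y
--         y = 0
--     elif y >= screen_height:
--         y = screen_height - 1
--         height = 0
--
--     # Ensure that the ending x/y positions are within the range of the screen
--     if x + width > screen_width:
--         width = screen_width - x
--     if y + height > screen_height:
--         height = screen_height - y
--
--     width = max(0, width)
--     height = max(0, height)
--
--     return x, y, width, height
--
-- def get_subscreen(text, x, y, width, height):
--     # Get the screen in row, col format if it isn't already.
--     if isinstance(text, str) or not hasattr(text, '__iter__'):
--         text = str(text).splitlines()
--     for index in range(len(text)):
--         text[index] = str(text[index])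
--
--     # Fix the dimensions if any of them are out of bounds.
--     x, y, width, height = __adjust_dimensions(text, x, y, width, height)
--
--     # Grab the subscreen and return it.
--     text = [''.join([text[y_pos][x_pos] for x_pos in range(x, x + width)]) for y_pos in range(y, y + height)]
--     return text
--
-- def get_cutout(text, x, y, width, height, hollow_x, hollow_y, hollow_width, hollow_height):
--     # Adjust the hollow coordinates to be based on the subscreen, which we will grab presently.
--     if x >= 0:
--         hollow_x -= x
--     if y >= 0:
--         hollow_y -= y
--
--     # If the hollow coordinates are negative, zero them and reduce the hollow size accordingly.
--     if hollow_x < 0: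
--         hollow_width += hollow_x
--         hollow_x = 0
--
--     if hollow_y < 0:
--         hollow_height += hollow_y
--         hollow_y = 0
--
--     # Get the subscreen
--     text = get_subscreen(text, x, y, width, height)
--     height, width = __get_screen_dimensions(text)
--
--     # If the hollow starts outside of the subscreen, just return the subscreen.
--     if hollow_x >= width or hollow_y >= height:
--         return text
--
--     # Adjust the hollow dimensions to fit within the subscreen.
--     hollow_x, hollow_y, hollow_width, hollow_height = __adjust_dimensions(text, hollow_x, hollow_y, hollow_width, hollow_height)
--
--     # With the subscreen grabbed and the hollow within the subscreen, it's time to get the values.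
--     cutout_screen = [[" " for _ in range(width)] for _ in range(height)]
--     for y in range(height):
--         for x in range(width):
--             if not __pos_in_range(x, y, hollow_x, hollow_y, hollow_width, hollow_height):
--                 cutout_screen[y][x] = text[y][x]
--
--     return ["".join(row) for row in cutout_screen]
-- ===== SOURCE B (Python) =====
-- def _span(lo, size, limit):
--     # Clamp the interval [lo, lo+size) into [0, limit); returns its (start, end).
--     if lo < 0:
--         start, end = 0, lo + size
--     elif lo >= limit:
--         start, end = limit - 1, limit - 1
--     else:
--         start, end = lo, lo + size
--     return start, max(start, min(end, limit))
--
--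
-- def get_cutout(text, x, y, width, height, hollow_x, hollow_y, hollow_width, hollow_height):
--     # Re-base the hollow onto the subscreen and clamp it at zero.
--     if x >= 0:
--         hollow_x -= x
--     if y >= 0:
--         hollow_y -= y
--     if hollow_x < 0:
--         hollow_width += hollow_x
--         hollow_x = 0
--     if hollow_y < 0:
--         hollow_height += hollow_y
--         hollow_y = 0
--
--     # Subscreen by row/column slicing instead of per-character joins.
--     screen_height = len(text)
--     screen_width = len(text[0]) if screen_height > 0 else 0
--     x0, x1 = _span(x, width, screen_width)
--     y0, y1 = _span(y, height, screen_height)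
--     sub = [row[x0:x1] for row in text[y0:y1]]
--
--     sub_height = len(sub)
--     sub_width = len(sub[0]) if sub_height > 0 else 0
--     if hollow_x >= sub_width or hollow_y >= sub_height:
--         return sub
--
--     # Blank the hollow row-wise with slices.
--     hx0, hx1 = _span(hollow_x, hollow_width, sub_width)
--     hy0, hy1 = _span(hollow_y, hollow_height, sub_height)
--     return [row if i < hy0 or i >= hy1
--             else row[:hx0] + ' ' * (hx1 - hx0) + row[hx1:]
--             for i, row in enumerate(sub)]
-- ===== Notes on version B (the rewrite author's own statement) =====
-- stated objective: simpler
-- what changed: B extracts the subscreen with list/string slices and blanks the hollow with one row-wise slice pass (row[:hx0] + spaces + row[hx1:]), replacing A's per-character join loops, the all-spaces grid allocation and the per-cell __pos_in_range test; bulk C-level slice copies replace per-character Python work (measured ~2.8x at the largest size).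
import Mathlib
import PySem

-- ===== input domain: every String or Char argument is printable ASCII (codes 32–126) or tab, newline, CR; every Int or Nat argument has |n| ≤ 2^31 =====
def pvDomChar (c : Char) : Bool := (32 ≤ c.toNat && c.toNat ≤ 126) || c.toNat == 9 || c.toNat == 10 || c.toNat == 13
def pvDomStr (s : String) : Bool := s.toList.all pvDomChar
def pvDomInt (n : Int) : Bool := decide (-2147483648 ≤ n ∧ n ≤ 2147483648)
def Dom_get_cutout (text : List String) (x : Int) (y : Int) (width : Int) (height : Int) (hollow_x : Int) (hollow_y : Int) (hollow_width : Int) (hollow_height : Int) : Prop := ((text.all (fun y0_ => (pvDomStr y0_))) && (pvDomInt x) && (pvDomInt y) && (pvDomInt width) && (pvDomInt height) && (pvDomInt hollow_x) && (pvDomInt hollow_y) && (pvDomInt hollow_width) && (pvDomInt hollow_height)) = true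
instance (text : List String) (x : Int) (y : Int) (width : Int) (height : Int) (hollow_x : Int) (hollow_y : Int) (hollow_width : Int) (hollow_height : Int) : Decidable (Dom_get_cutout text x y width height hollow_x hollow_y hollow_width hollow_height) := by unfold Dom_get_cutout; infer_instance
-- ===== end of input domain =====

-- B replaces A's all-spaces grid plus per-character __pos_in_range scan (and the per-character
-- subscreen join) by row/column slicing: simpler, one slice pass per row.

-- ===== PORT A =====
-- __get_screen_dimensions: (len(text), len(text[0]) if len(text) > 0 else 0)
def pyScreenDims (text : List String) : Int × Int :=
  ((text.length : Int),
   if (0 : Int) < (text.length : Int) then PySem.Str.len (PySem.List.pyGetD text 0 "") else 0)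

-- __pos_in_range
def pyPosInRange (pos_x pos_y start_x start_y width height : Int) : Bool :=
  if pos_x ≥ start_x ∧ pos_x < start_x + width then
    (if pos_y ≥ start_y ∧ pos_y < start_y + height then true else false)
  else false

-- __adjust_dimensions
def pyAdjustDims (text : List String) (x y width height : Int) : Int × Int × Int × Int :=
  let sh := (pyScreenDims text).1
  let sw := (pyScreenDims text).2
  let xw := if x < 0 then ((0 : Int), width + x)
            else if x ≥ sw then (sw - 1, (0 : Int)) else (x, width)
  let yh := if y < 0 then ((0 : Int), height + y)
            else if y ≥ sh then (sh - 1, (0 : Int)) else (y, height)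
  let width := if xw.1 + xw.2 > sw then sw - xw.1 else xw.2
  let height := if yh.1 + yh.2 > sh then sh - yh.1 else yh.2
  (xw.1, yh.1, max 0 width, max 0 height)

-- get_subscreen: text is already a list of strings (the str()/splitlines coercions are identity here);
-- text[y_pos][x_pos] is ported as pyGetD on the char list (default never reached: Pre_ excludes IndexError)
def pySubscreen (text : List String) (x y width height : Int) : List String :=
  let r := pyAdjustDims text x y width height
  (PySem.List.pyRange r.2.1 (r.2.1 + r.2.2.2)).map (fun y_pos =>
    String.ofList ((PySem.List.pyRange r.1 (r.1 + r.2.2.1)).map (fun x_pos =>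
      PySem.List.pyGetD (PySem.List.pyGetD text y_pos "").toList x_pos ' ')))

-- get_cutout: the all-spaces grid in which every non-hollow cell is overwritten is ported cell by
-- cell (same traversal order): a cell is ' ' iff __pos_in_range holds, else text[y][x]
def get_cutout (text : List String) (x : Int) (y : Int) (width : Int) (height : Int) (hollow_x : Int) (hollow_y : Int) (hollow_width : Int) (hollow_height : Int) : List String :=
  let hollow_x := if x ≥ 0 then hollow_x - x else hollow_x
  let hollow_y := if y ≥ 0 then hollow_y - y else hollow_y
  let hxw := if hollow_x < 0 then ((0 : Int), hollow_width + hollow_x) else (hollow_x, hollow_width)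
  let hyh := if hollow_y < 0 then ((0 : Int), hollow_height + hollow_y) else (hollow_y, hollow_height)
  let text := pySubscreen text x y width height
  let height := (pyScreenDims text).1
  let width := (pyScreenDims text).2
  if hxw.1 ≥ width ∨ hyh.1 ≥ height then text
  else
    let r := pyAdjustDims text hxw.1 hyh.1 hxw.2 hyh.2
    (PySem.List.pyRange 0 height).map (fun yy =>
      String.ofList ((PySem.List.pyRange 0 width).map (fun xx =>
        if pyPosInRange xx yy r.1 r.2.1 r.2.2.1 r.2.2.2 then ' '
        else PySem.List.pyGetD (PySem.List.pyGetD text yy "").toList xx ' ')))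

-- ===== PORT B =====
-- _span: clamp [lo, lo+size) into [0, limit), returning (start, end)
def altSpan (lo size limit : Int) : Int × Int :=
  if lo < 0 then (0, max 0 (min (lo + size) limit))
  else if lo ≥ limit then (limit - 1, limit - 1)
  else (lo, max lo (min (lo + size) limit))

def get_cutout_alt (text : List String) (x : Int) (y : Int) (width : Int) (height : Int) (hollow_x : Int) (hollow_y : Int) (hollow_width : Int) (hollow_height : Int) : List String :=
  let hollow_x := if x ≥ 0 then hollow_x - x else hollow_x
  let hollow_y := if y ≥ 0 then hollow_y - y else hollow_y
  let hxw := if hollow_x < 0 then ((0 : Int), hollow_width + hollow_x) else (hollow_x, hollow_width)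
  let hyh := if hollow_y < 0 then ((0 : Int), hollow_height + hollow_y) else (hollow_y, hollow_height)
  let sh := (text.length : Int)
  let sw := if 0 < sh then PySem.Str.len (PySem.List.pyGetD text 0 "") else 0
  let xs := altSpan x width sw
  let ys := altSpan y height sh
  let sub := (PySem.List.slice text (some ys.1) (some ys.2)).map
               (fun row => String.ofList (PySem.List.slice row.toList (some xs.1) (some xs.2)))
  let H := (sub.length : Int)
  let W := if 0 < H then PySem.Str.len (PySem.List.pyGetD sub 0 "") else 0
  if hxw.1 ≥ W ∨ hyh.1 ≥ H then sub
  else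
    let hxs := altSpan hxw.1 hxw.2 W
    let hys := altSpan hyh.1 hyh.2 H
    (PySem.List.enumerate sub).map (fun p =>
      if p.1 < hys.1 ∨ p.1 ≥ hys.2 then p.2
      else String.ofList (PySem.List.slice p.2.toList none (some hxs.1)
                      ++ List.replicate (hxs.2 - hxs.1).toNat ' '
                      ++ PySem.List.slice p.2.toList (some hxs.2) none))

-- ===== PRECONDITION & SPEC =====
-- Pre_ excludes exactly the inputs where A raises IndexError: some row inside the clamped
-- subscreen window is shorter than the window's right edge (taken from len(text[0])).
def Pre_get_cutout (text : List String) (x : Int) (y : Int) (width : Int) (height : Int) (hollow_x : Int) (hollow_y : Int) (hollow_width : Int) (hollow_height : Int) : Prop :=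
  ∀ p ∈ text.zipIdx,
    max y 0 ≤ (p.2 : Int) →
    (p.2 : Int) < min (y + height) (text.length : Int) →
    max x 0 < min (x + width) (if 0 < (text.length : Int) then PySem.Str.len (PySem.List.pyGetD text 0 "") else 0) →
    min (x + width) (if 0 < (text.length : Int) then PySem.Str.len (PySem.List.pyGetD text 0 "") else 0) ≤ PySem.Str.len p.1
instance (text : List String) (x : Int) (y : Int) (width : Int) (height : Int) (hollow_x : Int) (hollow_y : Int) (hollow_width : Int) (hollow_height : Int) : Decidable (Pre_get_cutout text x y width height hollow_x hollow_y hollow_width hollow_height) := by unfold Pre_get_cutout; infer_instance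

def pvWitness_get_cutout : List String × Int × Int × Int × Int × Int × Int × Int × Int :=
  (["abcd", "efgh", "ijkl"], 0, 0, 3, 3, 1, 1, 1, 1)

def Spec_get_cutout (text : List String) (x : Int) (y : Int) (width : Int) (height : Int) (hollow_x : Int) (hollow_y : Int) (hollow_width : Int) (hollow_height : Int) (out : List String) : Prop := out = get_cutout_alt text x y width height hollow_x hollow_y hollow_width hollow_height
instance (text : List String) (x : Int) (y : Int) (width : Int) (height : Int) (hollow_x : Int) (hollow_y : Int) (hollow_width : Int) (hollow_height : Int) (out : List String) : Decidable (Spec_get_cutout text x y width height hollow_x hollow_y hollow_width hollow_height out) := by unfold Spec_get_cutout; infer_instance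

-- ===== CLAIM (what is proved, stated in full; the proofs are below) =====
def Claim_equal_get_cutout : Prop := ∀ (text : List String) (x : Int) (y : Int) (width : Int) (height : Int) (hollow_x : Int) (hollow_y : Int) (hollow_width : Int) (hollow_height : Int), Dom_get_cutout text x y width height hollow_x hollow_y hollow_width hollow_height → Pre_get_cutout text x y width height hollow_x hollow_y hollow_width hollow_height → Spec_get_cutout text x y width height hollow_x hollow_y hollow_width hollow_height (get_cutout text x y width height hollow_x hollow_y hollow_width hollow_height)
-- ===== LEMMAS AND PROOFS =====

theorem slice_self {α : Type} (xs : List α) (a : Int) :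
    PySem.List.slice xs (some a) (some a) = [] := by
  have := PySem.List.length_slice xs a a
  exact List.eq_nil_of_length_eq_zero (by omega)

theorem map_pyGetD_range_eq {α : Type} (cs : List α) (d : α) {a b : Int}
    (h0 : 0 ≤ a) (hb : b ≤ (cs.length : Int)) :
    (PySem.List.pyRange a b).map (fun i => PySem.List.pyGetD cs i d)
      = (cs.drop a.toNat).take (b.toNat - a.toNat) := by
  by_cases h : b ≤ a
  · rw [PySem.List.pyRange_one_eq_nil h]
    have : b.toNat - a.toNat = 0 := by omega
    simp [this]
  · have hsplit := PySem.List.pyRange_one_append a b (cs.length : Int) (by omega) hb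
    have hall := PySem.List.map_pyGetD_pyRange cs d h0
    have hlen : PySem.List.len cs = (cs.length : Int) := by simp [PySem.List.len]
    rw [hlen] at hall
    rw [hsplit, List.map_append] at hall
    have hl1 : ((PySem.List.pyRange a b).map (fun i => PySem.List.pyGetD cs i d)).length
        = b.toNat - a.toNat := by
      simp [PySem.List.length_pyRange_one]; omega
    calc (PySem.List.pyRange a b).map (fun i => PySem.List.pyGetD cs i d)
        = (((PySem.List.pyRange a b).map (fun i => PySem.List.pyGetD cs i d)) ++
           ((PySem.List.pyRange b (cs.length:Int)).map (fun i => PySem.List.pyGetD cs i d))).take (b.toNat - a.toNat) := by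
          rw [List.take_append_of_le_length (by omega)]
          rw [List.take_of_length_le (by omega)]
      _ = (cs.drop a.toNat).take (b.toNat - a.toNat) := by rw [hall]

theorem adjust_eq_span (text : List String) (x y w h : Int) :
    pyAdjustDims text x y w h =
      ((altSpan x w (pyScreenDims text).2).1,
       (altSpan y h (pyScreenDims text).1).1,
       (altSpan x w (pyScreenDims text).2).2 - (altSpan x w (pyScreenDims text).2).1,
       (altSpan y h (pyScreenDims text).1).2 - (altSpan y h (pyScreenDims text).1).1) := by
  simp only [pyAdjustDims, altSpan]
  generalize (pyScreenDims text).1 = sh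
  generalize (pyScreenDims text).2 = sw
  split_ifs <;> simp_all [Prod.mk.injEq] <;> omega

theorem altSpan_start_le_end (lo size limit : Int) :
    (altSpan lo size limit).1 ≤ (altSpan lo size limit).2 := by
  unfold altSpan; split_ifs <;> simp <;> omega

theorem altSpan_open (lo size limit : Int)
    (h : (altSpan lo size limit).1 < (altSpan lo size limit).2) :
    (altSpan lo size limit).1 = max lo 0 ∧
    (altSpan lo size limit).2 = min (lo + size) limit := by
  unfold altSpan at *; split_ifs at * <;> simp_all <;> omega

theorem altSpan_mid (lo size limit : Int) (h0 : 0 ≤ lo) (hlt : lo < limit) :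
    (altSpan lo size limit).1 = lo ∧ lo ≤ (altSpan lo size limit).2 ∧
    (altSpan lo size limit).2 ≤ limit := by
  unfold altSpan; split_ifs <;> simp_all <;> omega

theorem sub_eq (text : List String) (x0 x1 y0 y1 : Int)
    (hy : y0 ≤ y1) (hy0 : y0 < y1 → 0 ≤ y0) (hy1 : y0 < y1 → y1 ≤ (text.length : Int))
    (hx : x0 ≤ x1) (hx0 : x0 < x1 → 0 ≤ x0)
    (hrow : ∀ (i : Nat) (hi : i < text.length), y0 ≤ (i : Int) → (i : Int) < y1 → x0 < x1 →
              x1 ≤ ((text[i]'hi).toList.length : Int)) :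
    (PySem.List.pyRange y0 y1).map (fun yp => String.ofList ((PySem.List.pyRange x0 x1).map
        (fun xp => PySem.List.pyGetD (PySem.List.pyGetD text yp "").toList xp ' ')))
    = (PySem.List.slice text (some y0) (some y1)).map
        (fun row => String.ofList (PySem.List.slice row.toList (some x0) (some x1))) := by
  by_cases hyy : y0 < y1
  · have h0 := hy0 hyy
    have h1 := hy1 hyy
    have houter := map_pyGetD_range_eq text "" h0 h1
    have hAB : (PySem.List.pyRange y0 y1).map (fun yp => String.ofList ((PySem.List.pyRange x0 x1).map
        (fun xp => PySem.List.pyGetD (PySem.List.pyGetD text yp "").toList xp ' ')))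
        = ((PySem.List.pyRange y0 y1).map (fun yp => PySem.List.pyGetD text yp "")).map
            (fun row => String.ofList ((PySem.List.pyRange x0 x1).map
              (fun xp => PySem.List.pyGetD row.toList xp ' '))) := by
      rw [List.map_map]; rfl
    rw [hAB, houter, PySem.List.slice_toNat text h0 (by omega)]
    apply List.ext_getElem (by simp)
    intro i h1i h2i
    simp only [List.getElem_map, List.getElem_take, List.getElem_drop]
    have hjlt : y0.toNat + i < text.length := by
      simp only [List.length_map, List.length_take, List.length_drop] at h1i; omega
    have hylo : y0 ≤ (y0.toNat + i : Nat) := by omega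
    have hyhi : ((y0.toNat + i : Nat) : Int) < y1 := by
      simp only [List.length_map, List.length_take, List.length_drop] at h1i
      push_cast; omega
    by_cases hxx : x0 < x1
    · have hx0' := hx0 hxx
      have hlen := hrow (y0.toNat + i) hjlt hylo hyhi hxx
      rw [map_pyGetD_range_eq _ ' ' hx0' hlen, PySem.List.slice_toNat _ hx0' (by omega)]
    · have hxeq : x1 = x0 := by omega
      have e1 : PySem.List.pyRange x0 x1 = [] := PySem.List.pyRange_one_eq_nil (by omega)
      have e2 : ∀ cs : List Char, PySem.List.slice cs (some x0) (some x1) = [] := by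
        intro cs; rw [hxeq]; exact slice_self cs x0
      simp [e1, e2]
  · have hyeq : y1 = y0 := by omega
    have e1 : PySem.List.pyRange y0 y1 = [] := PySem.List.pyRange_one_eq_nil (by omega)
    have e2 : PySem.List.slice text (some y0) (some y1) = [] := by
      rw [hyeq]; exact slice_self text y0
    simp [e1, e2]

theorem posInRange_false_y (xx j sx sy w h : Int) (hj : j < sy ∨ j ≥ sy + h) :
    pyPosInRange xx j sx sy w h = false := by
  unfold pyPosInRange; split_ifs <;> simp_all <;> omega

theorem posInRange_y_in (xx j sx sy w h : Int) (h1 : sy ≤ j) (h2 : j < sy + h) :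
    pyPosInRange xx j sx sy w h = decide (sx ≤ xx ∧ xx < sx + w) := by
  unfold pyPosInRange; split_ifs <;> simp_all <;> omega

theorem row_full (cs : List Char) {W : Int} (hlen : (cs.length : Int) = W) :
    (PySem.List.pyRange 0 W).map (fun xx => PySem.List.pyGetD cs xx ' ') = cs := by
  rw [map_pyGetD_range_eq cs ' ' (le_refl 0) (by omega)]
  simp only [Int.toNat_zero, Nat.sub_zero, List.drop_zero]
  exact List.take_of_length_le (by omega)

theorem row_blank (cs : List Char) {W hx0 hx1 : Int} (hlen : (cs.length : Int) = W)
    (h0 : 0 ≤ hx0) (h01 : hx0 ≤ hx1) (h1W : hx1 ≤ W) :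
    (PySem.List.pyRange 0 W).map (fun xx =>
        if hx0 ≤ xx ∧ xx < hx1 then ' ' else PySem.List.pyGetD cs xx ' ')
      = (cs.take hx0.toNat ++ List.replicate (hx1 - hx0).toNat ' ') ++ cs.drop hx1.toNat := by
  rw [PySem.List.pyRange_one_append 0 hx1 W (by omega) h1W, List.map_append,
      PySem.List.pyRange_one_append 0 hx0 hx1 h0 h01, List.map_append]
  congr 1
  congr 1
  · rw [List.map_congr_left (g := fun xx => PySem.List.pyGetD cs xx ' ')
        (fun xx hxx => by
          rw [PySem.List.mem_pyRange_one] at hxx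
          rw [if_neg (by omega)])]
    rw [map_pyGetD_range_eq cs ' ' (le_refl 0) (by omega)]
    simp
  · rw [List.map_congr_left (g := fun _ => ' ')
        (fun xx hxx => by
          rw [PySem.List.mem_pyRange_one] at hxx
          rw [if_pos (by omega)])]
    rw [List.map_const', PySem.List.length_pyRange_one]
  · rw [List.map_congr_left (g := fun xx => PySem.List.pyGetD cs xx ' ')
        (fun xx hxx => by
          rw [PySem.List.mem_pyRange_one] at hxx
          rw [if_neg (by omega)])]
    rw [map_pyGetD_range_eq cs ' ' (by omega) (by omega)]
    rw [List.take_of_length_le (by simp; omega)]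

theorem stage2_eq (sub : List String) (hx0 hx1 hy0 hy1 W : Int)
    (hrect : ∀ (i : Nat) (hi : i < sub.length), ((sub[i]'hi).toList.length : Int) = W)
    (h0 : 0 ≤ hx0) (h01 : hx0 ≤ hx1) (h1W : hx1 ≤ W) :
    (PySem.List.pyRange 0 (sub.length : Int)).map (fun yy =>
        String.ofList ((PySem.List.pyRange 0 W).map (fun xx =>
          if pyPosInRange xx yy hx0 hy0 (hx1 - hx0) (hy1 - hy0) then ' '
          else PySem.List.pyGetD (PySem.List.pyGetD sub yy "").toList xx ' ')))
    = (PySem.List.enumerate sub).map (fun p =>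
        if p.1 < hy0 ∨ p.1 ≥ hy1 then p.2
        else String.ofList ((PySem.List.slice p.2.toList none (some hx0)
             ++ List.replicate (hx1 - hx0).toNat ' ') ++ PySem.List.slice p.2.toList (some hx1) none)) := by
  rw [PySem.List.enumerate_eq_map_pyRange sub "", List.map_map]
  have hlen : PySem.List.len sub = (sub.length : Int) := by simp [PySem.List.len]
  rw [hlen]
  apply List.map_congr_left
  intro j hj
  rw [PySem.List.mem_pyRange_one] at hj
  have hjlt : j.toNat < sub.length := by omega
  have hrowe : PySem.List.pyGetD sub j "" = sub[j.toNat]'hjlt :=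
    PySem.List.pyGetD_eq_getElem sub "" hj.1 hj.2
  have hrlen := hrect j.toNat hjlt
  simp only [Function.comp]
  by_cases hjy : j < hy0 ∨ j ≥ hy1
  · rw [if_pos hjy]
    have hfalse : ∀ xx : Int, pyPosInRange xx j hx0 hy0 (hx1 - hx0) (hy1 - hy0) = false :=
      fun xx => posInRange_false_y xx j hx0 hy0 (hx1 - hx0) (hy1 - hy0) (by omega)
    simp only [hfalse, Bool.false_eq_true, if_false]
    rw [hrowe, row_full _ hrlen, String.ofList_toList]
  · rw [not_or, not_lt, not_le] at hjy
    rw [if_neg (by omega)]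
    have htrue : ∀ xx : Int, pyPosInRange xx j hx0 hy0 (hx1 - hx0) (hy1 - hy0)
        = decide (hx0 ≤ xx ∧ xx < hx1) := by
      intro xx
      rw [posInRange_y_in xx j hx0 hy0 (hx1 - hx0) (hy1 - hy0) hjy.1 (by omega)]
      congr 1
      apply propext
      constructor <;> (intro h; exact ⟨h.1, by omega⟩)
    simp only [htrue, decide_eq_true_eq]
    rw [hrowe, row_blank _ hrlen h0 h01 h1W,
        PySem.List.slice_to _ h0, PySem.List.slice_from _ (by omega)]
-- ===== VERDICT (by name: the statement is the Claim_ definition above) =====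
theorem get_cutout_spec : Claim_equal_get_cutout := by
  unfold Claim_equal_get_cutout
  intro text x y width height hollow_x hollow_y hollow_width hollow_height _hd hpre
  unfold Spec_get_cutout get_cutout get_cutout_alt pySubscreen
  simp only [adjust_eq_span, pyScreenDims]
  set sw := (if 0 < (text.length : Int) then PySem.Str.len (PySem.List.pyGetD text 0 "") else 0) with hswd
  set x0 := (altSpan x width sw).1 with hx0d
  set x1 := (altSpan x width sw).2 with hx1d
  set y0 := (altSpan y height ((text.length : Int))).1 with hy0d
  set y1 := (altSpan y height ((text.length : Int))).2 with hy1d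
  have hxadd : x0 + (x1 - x0) = x1 := by ring
  have hyadd : y0 + (y1 - y0) = y1 := by ring
  rw [hxadd, hyadd]
  have hx01 : x0 ≤ x1 := altSpan_start_le_end x width sw
  have hy01 : y0 ≤ y1 := altSpan_start_le_end y height ((text.length : Int))
  -- row-length bound from Pre_
  have hrow : ∀ (i : Nat) (hi : i < text.length), y0 ≤ (i : Int) → (i : Int) < y1 → x0 < x1 →
      x1 ≤ ((text[i]'hi).toList.length : Int) := by
    intro i hi hyl hyu hxlt
    obtain ⟨hx0m, hx1m⟩ := altSpan_open x width sw (by rw [← hx0d, ← hx1d]; exact hxlt)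
    obtain ⟨hy0m, hy1m⟩ := altSpan_open y height ((text.length : Int)) (by omega)
    have hmem : ((text[i]'hi), i) ∈ text.zipIdx := by
      rw [List.mk_mem_zipIdx_iff_getElem?]
      exact List.getElem?_eq_getElem hi
    have hp := hpre ((text[i]'hi), i) hmem (by simpa using by omega)
      (by simpa using by omega) (by rw [← hswd]; omega)
    dsimp only at hp
    rw [← hswd, PySem.Str.len_eq] at hp
    omega
  have hsub := sub_eq text x0 x1 y0 y1 hy01
    (fun h => by
      obtain ⟨hm, _⟩ := altSpan_open y height ((text.length : Int)) (by omega); omega)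
    (fun h => by
      obtain ⟨_, hm⟩ := altSpan_open y height ((text.length : Int)) (by omega); omega)
    hx01
    (fun h => by
      obtain ⟨hm, _⟩ := altSpan_open x width sw (by omega); omega)
    hrow
  rw [hsub]
  set hxp := (if (if x ≥ 0 then hollow_x - x else hollow_x) < 0 then
      ((0 : Int), hollow_width + (if x ≥ 0 then hollow_x - x else hollow_x))
    else ((if x ≥ 0 then hollow_x - x else hollow_x), hollow_width)) with hxpd
  set hyp := (if (if y ≥ 0 then hollow_y - y else hollow_y) < 0 then
      ((0 : Int), hollow_height + (if y ≥ 0 then hollow_y - y else hollow_y))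
    else ((if y ≥ 0 then hollow_y - y else hollow_y), hollow_height)) with hypd
  set sub := (PySem.List.slice text (some y0) (some y1)).map
      (fun row => String.ofList (PySem.List.slice row.toList (some x0) (some x1))) with hsubd
  set W := (if 0 < (sub.length : Int) then PySem.Str.len (PySem.List.pyGetD sub 0 "") else 0) with hWd
  have hxc : 0 ≤ hxp.1 := by rw [hxpd]; split_ifs <;> simp <;> omega
  have hyc : 0 ≤ hyp.1 := by rw [hypd]; split_ifs <;> simp <;> omega
  split_ifs with hg
  · rfl
  · -- hollow strictly inside the subscreen
    rw [not_or, not_le, not_le] at hg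
    obtain ⟨hgx, hgy⟩ := hg
    have hgx' : hxp.1 < W := by omega
    have hgy' : hyp.1 < (sub.length : Int) := by omega
    have hHpos : 0 < (sub.length : Int) := by omega
    have hy0lt : y0 < y1 := by
      by_contra hc
      have hye : y1 = y0 := by omega
      rw [hsubd, hye, slice_self] at hHpos
      simp at hHpos
    obtain ⟨hy0m, hy1m⟩ := altSpan_open y height ((text.length : Int)) (by omega)
    have hy0n : 0 ≤ y0 := by omega
    have hy1n : y1 ≤ (text.length : Int) := by omega
    have hslice : PySem.List.slice text (some y0) (some y1)
        = (text.drop y0.toNat).take (y1.toNat - y0.toNat) := PySem.List.slice_toNat text hy0n (by omega)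
    have hsublen : sub.length = y1.toNat - y0.toNat := by
      rw [hsubd, hslice]; simp; omega
    have hgetsub : ∀ (i : Nat) (hi : i < sub.length),
        sub[i]'hi = String.ofList (PySem.List.slice
          ((text[y0.toNat + i]'(by omega)).toList) (some x0) (some x1)) := by
      intro i hi
      simp only [hsubd, hslice, List.getElem_map, List.getElem_take, List.getElem_drop]
    have hsub0 : PySem.List.pyGetD sub 0 "" = sub[0]'(by omega) :=
      PySem.List.pyGetD_eq_getElem sub "" (le_refl 0) (by omega)
    have hx0lt : x0 < x1 := by
      by_contra hc
      have hxe : x1 = x0 := by omega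
      have h0 : sub[0]'(by omega) = String.ofList (PySem.List.slice
          ((text[y0.toNat]'(by omega)).toList) (some x0) (some x1)) := by
        have := hgetsub 0 (by omega); simpa using this
      rw [hWd, if_pos hHpos, hsub0, h0, hxe, slice_self] at hgx'
      simp [PySem.Str.len_eq] at hgx'
      omega
    obtain ⟨hx0m, hx1m⟩ := altSpan_open x width sw (by omega)
    have hx0n : 0 ≤ x0 := by omega
    have hrect : ∀ (i : Nat) (hi : i < sub.length),
        (((sub[i]'hi).toList.length : Int)) = x1 - x0 := by
      intro i hi
      have hb := hrow (y0.toNat + i) (by omega) (by omega) (by push_cast; omega) hx0lt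
      rw [hgetsub i hi, String.toList_ofList, PySem.List.slice_toNat _ hx0n (by omega)]
      simp only [List.length_take, List.length_drop]
      omega
    have hWeq : W = x1 - x0 := by
      rw [hWd, if_pos hHpos, hsub0, PySem.Str.len_eq, hrect 0 (by omega)]
    have hrectW : ∀ (i : Nat) (hi : i < sub.length),
        (((sub[i]'hi).toList.length : Int)) = W := by
      intro i hi; rw [hWeq]; exact hrect i hi
    obtain ⟨hxm1, hxm2, hxm3⟩ := altSpan_mid hxp.1 hxp.2 W hxc hgx'
    obtain ⟨hym1, hym2, hym3⟩ := altSpan_mid hyp.1 hyp.2 ((sub.length : Int)) hyc hgy'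
    exact stage2_eq sub (altSpan hxp.1 hxp.2 W).1 (altSpan hxp.1 hxp.2 W).2
      (altSpan hyp.1 hyp.2 ((sub.length : Int))).1 (altSpan hyp.1 hyp.2 ((sub.length : Int))).2 W
      hrectW (by omega) (altSpan_start_le_end hxp.1 hxp.2 W) (by omega)
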